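-- pv_equiv track=rewrite | github.com/marcdred/bully-mact-tool | CAT_TO_MACT.py | get_keywords_from_line
-- ===== SOURCE A (Python) =====
-- def get_keywords_from_line(line):
-- 	# get split positions, don't split quoted characters
-- 	quoting = False
-- 	split_at = []
-- 	for i, c in enumerate(line):
-- 		if not quoting:
-- 			if c.isspace():
-- 				split_at.append(i)
-- 		if c == "\"":
-- 			quoting = not quoting
-- 	# make split
-- 	keywords = []
-- 	start = 0
-- 	for split in split_at:
-- 		keyword = line[start:split]
-- 		keywords.append(keyword)
-- 		start = split+1
-- 	keywords.append(line[start:len(line)])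
-- 	# remove empty words
-- 	keywords = list(keywords)
-- 	non_empty_keywords = []
-- 	for kw in keywords:
-- 		if len(kw):
-- 			non_empty_keywords.append(kw)
-- 	return non_empty_keywords
-- ===== SOURCE B (Python) =====
-- def get_keywords_from_line(line):
-- 	# one streaming pass: flush buffer at unquoted whitespace, keep everything else
-- 	quoting = False
-- 	buf = []
-- 	keywords = []
-- 	for c in line:
-- 		if not quoting and c.isspace():
-- 			if buf:
-- 				keywords.append(''.join(buf))
-- 			buf = []
-- 		else:
-- 			buf.append(c)
-- 		if c == '"':
-- 			quoting = not quoting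
-- 	if buf:
-- 		keywords.append(''.join(buf))
-- 	return keywords
-- ===== Notes on version B (the rewrite author's own statement) =====
-- stated objective: simpler
-- what changed: Replaces A's three passes (collect split indices over enumerate, then slice the string at those indices, then filter out empty pieces) with a single streaming pass that keeps a quoting flag and a character buffer, flushing the buffer (only when non-empty) at each unquoted whitespace character.
import Mathlib
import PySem

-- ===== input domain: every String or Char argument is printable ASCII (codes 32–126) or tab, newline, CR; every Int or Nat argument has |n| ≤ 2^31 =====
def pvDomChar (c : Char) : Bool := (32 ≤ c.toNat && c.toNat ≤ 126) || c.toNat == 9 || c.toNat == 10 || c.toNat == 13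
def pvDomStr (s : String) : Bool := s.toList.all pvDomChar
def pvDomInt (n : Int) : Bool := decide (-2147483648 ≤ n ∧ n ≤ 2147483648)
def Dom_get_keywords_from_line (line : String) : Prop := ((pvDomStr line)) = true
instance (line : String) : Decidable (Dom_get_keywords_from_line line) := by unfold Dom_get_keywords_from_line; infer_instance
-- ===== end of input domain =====

-- B replaces A's three passes (collect split indices, slice at them, filter empties) by one
-- streaming pass with a quoting flag and a character buffer: simpler, same O(n) cost.

-- ===== PORT A =====
-- pass-1 loop body: 'if not quoting: if c.isspace(): split_at.append(i); if c == '"': quoting = not quoting'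
def pvAStep1 (s : Bool × List Int) (ic : Int × Char) : Bool × List Int :=
  let s1 := if !s.1 && PySem.Chars.isspace ic.2 then (s.1, s.2 ++ [ic.1]) else s
  (if ic.2 == '"' then !s1.1 else s1.1, s1.2)

-- pass-2 loop body: 'keyword = line[start:split]; keywords.append(keyword); start = split+1'
def pvAStep2 (line : String) (s : List String × Int) (sp : Int) : List String × Int :=
  (s.1 ++ [PySem.Str.slice line (some s.2) (some sp)], sp + 1)

-- after pass 2: 'keywords.append(line[start:len(line)])'
def pvAFinish (line : String) (p2 : List String × Int) : List String :=
  p2.1 ++ [PySem.Str.slice line (some p2.2) (some (PySem.Str.len line))]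

def get_keywords_from_line (line : String) : List String :=
  -- pass 3: 'for kw in keywords: if len(kw): non_empty_keywords.append(kw)'
  (pvAFinish line
      ((((PySem.List.enumerate line.toList 0).foldl pvAStep1 (false, [])).2).foldl
        (pvAStep2 line) ([], 0))).foldl
    (fun acc kw => if PySem.Str.len kw ≠ 0 then acc ++ [kw] else acc) []

-- ===== PORT B =====
-- loop body over (quoting, buf, keywords); ''.join(buf) over single characters is String.ofList (exact)
def pvBStep (s : Bool × List Char × List String) (c : Char) : Bool × List Char × List String :=
  let s1 :=
    if !s.1 && PySem.Chars.isspace c then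
      (s.1, ([] : List Char), if s.2.1 ≠ [] then s.2.2 ++ [String.ofList s.2.1] else s.2.2)
    else (s.1, s.2.1 ++ [c], s.2.2)
  (if c == '"' then !s1.1 else s1.1, s1.2)

-- trailing flush: 'if buf: keywords.append(''.join(buf))'
def pvBFinish (st : Bool × List Char × List String) : List String :=
  if st.2.1 ≠ [] then st.2.2 ++ [String.ofList st.2.1] else st.2.2

def get_keywords_from_line_alt (line : String) : List String :=
  pvBFinish (line.toList.foldl pvBStep (false, [], []))

-- ===== PRECONDITION & SPEC =====
def Spec_get_keywords_from_line (line : String) (out : List String) : Prop := out = get_keywords_from_line_alt line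
instance (line : String) (out : List String) : Decidable (Spec_get_keywords_from_line line out) := by unfold Spec_get_keywords_from_line; infer_instance

-- ===== CLAIM (what is proved, stated in full; the proofs are below) =====
def Claim_equal_get_keywords_from_line : Prop := ∀ (line : String), Dom_get_keywords_from_line line → Spec_get_keywords_from_line line (get_keywords_from_line line)

-- ===== LEMMAS AND PROOFS =====

-- a whitespace character is never the quote character
theorem pvSpaceNotQuote {c : Char} (h : PySem.Chars.isspace c = true) : (c == '"') = false := by
  by_cases hq : c = '"'
  · subst hq; simp [PySem.Chars.isspace] at h
  · simp [hq]

-- the quoting state after one character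
def pvStep (q : Bool) (c : Char) : Bool := if c == '"' then !q else q

-- indices (from n) of unquoted whitespace characters in cs — what A's pass 1 collects
def pvSplits (q : Bool) (n : Nat) : List Char → List Nat
  | [] => []
  | c :: cs =>
    (if !q && PySem.Chars.isspace c then [n] else []) ++ pvSplits (pvStep q c) (n + 1) cs

-- the pieces of L cut at the given positions from start — A's passes 2–3 at character level
def pvPieces (L : List Char) (start : Nat) : List Nat → List (List Char)
  | [] => [(L.drop start).take (L.length - start)]
  | sp :: rest => (L.drop start).take (sp - start) :: pvPieces L (sp + 1) rest

-- B's streaming tokenizer at character level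
def pvToks (q : Bool) (buf : List Char) : List Char → List (List Char)
  | [] => if buf = [] then [] else [buf]
  | c :: cs =>
    if !q && PySem.Chars.isspace c then
      (if buf = [] then [] else [buf]) ++ pvToks q [] cs
    else pvToks (pvStep q c) (buf ++ [c]) cs

theorem pvAStep1_eq (q : Bool) (acc : List Int) (i : Int) (c : Char) :
    pvAStep1 (q, acc) (i, c)
      = (pvStep q c, acc ++ (if !q && PySem.Chars.isspace c then [i] else [])) := by
  by_cases hs : (!q && PySem.Chars.isspace c) = true <;> simp [pvAStep1, pvStep, hs]

theorem pvBStep_eq (q : Bool) (buf : List Char) (out : List String) (c : Char) :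
    pvBStep (q, buf, out) c
      = if !q && PySem.Chars.isspace c then
          (pvStep q c, [], if buf ≠ [] then out ++ [String.ofList buf] else out)
        else (pvStep q c, buf ++ [c], out) := by
  by_cases hs : (!q && PySem.Chars.isspace c) = true <;> simp [pvBStep, pvStep, hs]

-- Python string slice with Nat bounds, at character level
theorem pvSliceEq (line : String) (a b : Nat) :
    PySem.Str.slice line (some (a : Int)) (some (b : Int))
      = String.ofList ((line.toList.drop a).take (b - a)) := by
  have h : (PySem.Str.slice line (some (a : Int)) (some (b : Int))).toList
      = (line.toList.drop a).take (b - a) := by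
    rw [PySem.Str.toList_slice]
    simp [PySem.Chars.slice_eq_listSlice, PySem.List.slice_natCast]
  rw [← h, String.ofList_toList]

-- A's pass 1 collects exactly pvSplits
theorem pvA1 (cs : List Char) : ∀ (q : Bool) (n : Nat) (acc : List Int),
    ((PySem.List.enumerate cs (n : Int)).foldl pvAStep1 (q, acc)).2
      = acc ++ (pvSplits q n cs).map (fun k : Nat => (k : Int)) := by
  induction cs with
  | nil => intro q n acc; simp [pvSplits, PySem.List.enumerate_nil]
  | cons c cs ih =>
    intro q n acc
    rw [PySem.List.enumerate_cons, List.foldl_cons, pvAStep1_eq]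
    rw [show (n : Int) + 1 = ((n + 1 : Nat) : Int) from by push_cast; ring]
    rw [ih]
    by_cases hs : (!q && PySem.Chars.isspace c) = true <;> simp [pvSplits, hs]

-- A's pass 2 plus the tail slice builds exactly the pvPieces, as strings
theorem pvA2 (line : String) (sps : List Nat) : ∀ (start : Nat) (ks : List String),
    pvAFinish line ((sps.map (fun k : Nat => (k : Int))).foldl (pvAStep2 line) (ks, (start : Int)))
      = ks ++ (pvPieces line.toList start sps).map String.ofList := by
  induction sps with
  | nil =>
    intro start ks
    simp [pvAFinish, pvPieces, PySem.Str.len_eq, pvSliceEq]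
  | cons sp rest ih =>
    intro start ks
    simp only [List.map_cons, List.foldl_cons, pvAStep2]
    rw [show (sp : Int) + 1 = ((sp + 1 : Nat) : Int) from by push_cast; ring]
    rw [ih (sp + 1) (ks ++ [PySem.Str.slice line (some (start : Int)) (some (sp : Int))])]
    rw [pvSliceEq]
    simp [pvPieces]

-- B's fold plus the trailing flush computes exactly pvToks, as strings
theorem pvB1 (cs : List Char) : ∀ (q : Bool) (buf : List Char) (out : List String),
    pvBFinish (cs.foldl pvBStep (q, buf, out)) = out ++ (pvToks q buf cs).map String.ofList := by
  induction cs with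
  | nil =>
    intro q buf out
    by_cases hb : buf = [] <;> simp [pvBFinish, pvToks, hb]
  | cons c cs ih =>
    intro q buf out
    rw [List.foldl_cons, pvBStep_eq]
    by_cases hs : (!q && PySem.Chars.isspace c) = true
    · have hnq : (c == '"') = false := pvSpaceNotQuote (Bool.and_elim_right hs)
      rw [if_pos hs, ih]
      have hq : pvStep q c = q := by simp [pvStep, hnq]
      rw [hq]
      by_cases hb : buf = [] <;> simp [pvToks, hs, hb]
    · rw [if_neg hs, ih]
      simp [pvToks, hs]

-- the bridge: cutting L at its unquoted-whitespace positions and dropping empty pieces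
-- is the streaming tokenizer, with the pending piece L[start:pos] as the buffer
theorem pvMain (L : List Char) (cs : List Char) : ∀ (q : Bool) (start pos : Nat),
    start ≤ pos → pos ≤ L.length → cs = L.drop pos →
    (pvPieces L start (pvSplits q pos cs)).filter (fun k => !k.isEmpty)
      = pvToks q ((L.drop start).take (pos - start)) cs := by
  induction cs generalizing L with
  | nil =>
    intro q start pos h1 h2 h3
    have hpos : pos = L.length := le_antisymm h2 (List.drop_eq_nil_iff.mp h3.symm)
    subst hpos
    by_cases hb : (L.drop start).take (L.length - start) = [] <;>
      simp [pvSplits, pvPieces, pvToks, hb]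
  | cons c cs ih =>
    intro q start pos h1 h2 h3
    have hlt : pos < L.length := by
      by_contra h
      rw [Nat.not_lt] at h
      rw [List.drop_eq_nil_of_le h] at h3
      exact List.cons_ne_nil _ _ h3
    have hdrop1 : L.drop (pos + 1) = cs := by
      have h4 : cs = (L.drop pos).drop 1 := by rw [← h3]; rfl
      rw [List.drop_drop] at h4
      exact h4.symm
    have hext : (L.drop start).take (pos + 1 - start)
        = (L.drop start).take (pos - start) ++ [c] := by
      rw [show pos + 1 - start = (pos - start) + 1 from by omega, List.take_add]
      rw [List.drop_drop, show start + (pos - start) = pos from by omega, ← h3]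
      rfl
    by_cases hs : (!q && PySem.Chars.isspace c) = true
    · have hnq : (c == '"') = false := pvSpaceNotQuote (Bool.and_elim_right hs)
      have hq : pvStep q c = q := by simp [pvStep, hnq]
      rw [show pvSplits q pos (c :: cs) = pos :: pvSplits q (pos + 1) cs from by
        simp [pvSplits, hs, hq]]
      rw [show pvPieces L start (pos :: pvSplits q (pos + 1) cs)
          = (L.drop start).take (pos - start) :: pvPieces L (pos + 1) (pvSplits q (pos + 1) cs)
        from rfl]
      rw [List.filter_cons]
      have ihh := ih L q (pos + 1) (pos + 1) le_rfl (by omega) hdrop1.symm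
      simp only [Nat.sub_self, List.take_zero] at ihh
      rw [ihh]
      by_cases hb : (L.drop start).take (pos - start) = [] <;> simp [pvToks, hs, hb]
    · rw [show pvSplits q pos (c :: cs) = pvSplits (pvStep q c) (pos + 1) cs from by
        simp [pvSplits, hs]]
      rw [ih L (pvStep q c) start (pos + 1) (by omega) (by omega) hdrop1.symm]
      rw [hext]
      simp [pvToks, hs]

-- the non-empty-length test on built strings is non-emptiness of the character list
theorem pvPredEq :
    ((fun kw => decide (PySem.Str.len kw ≠ 0)) ∘ String.ofList) = fun k : List Char => !k.isEmpty := by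
  funext k
  simp [PySem.Str.len_eq]
  cases k <;> simp

-- ===== VERDICT (by name: the statement is the Claim_ definition above) =====
theorem get_keywords_from_line_spec : Claim_equal_get_keywords_from_line := by
  unfold Claim_equal_get_keywords_from_line
  intro line _
  unfold Spec_get_keywords_from_line
  unfold get_keywords_from_line get_keywords_from_line_alt
  have h1 := pvA1 line.toList false 0 []
  simp only [Nat.cast_zero, List.nil_append] at h1
  rw [h1]
  have h2 := pvA2 line (pvSplits false 0 line.toList) 0 []
  simp only [Nat.cast_zero, List.nil_append] at h2
  rw [h2]
  rw [PySem.List.foldl_append_ite_eq_filter]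
  rw [List.filter_map, pvPredEq]
  have h3 := pvMain line.toList line.toList false 0 0 le_rfl (Nat.zero_le _) (by simp : line.toList = line.toList.drop 0)
  simp only [Nat.sub_self, List.take_zero] at h3
  rw [h3]
  rw [pvB1 line.toList false [] []]
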